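-- pv_equiv track=rewrite | github.com/maxim-s-barabash/ocsw | ocsw/utils/table.py | expand_cells
-- ===== SOURCE A (Python) =====
-- def expand_cells(row, columns):
--     """Expand the height of each cell to the height of the row."""
--     height = max([len(cell) for cell in row])
--     new_row = []
--     for cell_idx, cell in enumerate(row):
--         width = columns[cell_idx]["width"]
--         blank = " " * width
--         new_row.append(cell + [blank] * (height - len(cell)))
--     return list(zip(*new_row))
-- ===== SOURCE B (Python) =====
-- def expand_cells(row, columns):
--     """Expand the height of each cell to the height of the row."""
--     height = max(len(cell) for cell in row)
--     blanks = [" " * columns[i]["width"] for i in range(len(row))]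
--     return [tuple(cell[h] if h < len(cell) else blanks[i]
--                   for i, cell in enumerate(row))
--             for h in range(height)]
-- ===== Notes on version B (the rewrite author's own statement) =====
-- stated objective: alternative
-- what changed: B builds the transposed result directly row-major (one comprehension over range(height) with an inline pad-on-lookup and precomputed per-column blanks) instead of A's pad-every-cell-then-zip(*) transpose; no padded new_row is materialised.
import Mathlib
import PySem

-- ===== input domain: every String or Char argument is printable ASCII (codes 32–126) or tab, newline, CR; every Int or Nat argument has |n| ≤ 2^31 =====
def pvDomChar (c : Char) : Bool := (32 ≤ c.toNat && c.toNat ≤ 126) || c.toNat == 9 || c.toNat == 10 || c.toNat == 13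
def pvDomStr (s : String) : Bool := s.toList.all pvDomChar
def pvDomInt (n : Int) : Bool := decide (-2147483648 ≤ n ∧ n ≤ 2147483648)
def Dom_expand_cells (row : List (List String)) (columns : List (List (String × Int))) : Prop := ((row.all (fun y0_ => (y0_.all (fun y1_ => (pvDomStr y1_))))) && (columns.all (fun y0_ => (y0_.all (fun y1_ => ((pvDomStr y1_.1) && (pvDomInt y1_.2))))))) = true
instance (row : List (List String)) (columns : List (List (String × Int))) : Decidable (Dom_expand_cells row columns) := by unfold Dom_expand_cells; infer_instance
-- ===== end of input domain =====

-- B builds the transposed table directly, row-major, with per-column blanks precomputed;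
-- A pads every cell to the row height and transposes with zip(*). Return values agree.

-- shared helper: columns[i]["width"] (assoc-list dict, first match; Pre_ guarantees the key
-- and index exist, so the getD defaults are never reached inside Pre_) turned into the blank
-- string " " * width (exact: Python's " " * w is "" for w ≤ 0, matching toNat's clamp).
def pvWidth? (d : List (String × Int)) : Option Int :=
  (d.find? (fun q => q.1 == "width")).map (fun q => q.2)

def pvBlank (columns : List (List (String × Int))) (i : Nat) : String :=
  String.mk (List.replicate ((pvWidth? (columns.getD i [])).getD 0).toNat ' ')

-- ===== PORT A =====
-- zip(*rows): truncate to the shortest row (zip() of no iterables is empty)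
def pvZipStar (rows : List (List String)) : List (List String) :=
  (List.range (((rows.map (·.length)).min?).getD 0)).map (fun h => rows.map (fun r => r.getD h ""))

def expand_cells (row : List (List String)) (columns : List (List (String × Int))) : List (List String) :=
  -- max([...]) raises ValueError on an empty row: Pre_ excludes row = []
  let height : Nat := ((PySem.List.max? (row.map (·.length)) (fun x => x)).getD 0)
  let new_row := (PySem.List.enumerate row 0).map (fun p =>
    p.2 ++ List.replicate (height - p.2.length) (pvBlank columns p.1.toNat))
  pvZipStar new_row

-- ===== PORT B =====
def expand_cells_alt (row : List (List String)) (columns : List (List (String × Int))) : List (List String) :=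
  let height : Nat := ((PySem.List.max? (row.map (·.length)) (fun x => x)).getD 0)
  let blanks := (List.range row.length).map (fun i => pvBlank columns i)
  (List.range height).map (fun h =>
    (PySem.List.enumerate row 0).map (fun p =>
      if h < p.2.length then p.2.getD h "" else blanks.getD p.1.toNat ""))

-- ===== PRECONDITION & SPEC =====
-- Pre_ excludes exactly the inputs where Python A raises: an empty row (ValueError from max)
-- and rows reaching a missing column index (IndexError) or a column without "width" (KeyError).
def Pre_expand_cells (row : List (List String)) (columns : List (List (String × Int))) : Prop :=
  row ≠ [] ∧ row.length ≤ columns.length ∧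
    ∀ i < row.length, (pvWidth? (columns.getD i [])).isSome
instance (row : List (List String)) (columns : List (List (String × Int))) : Decidable (Pre_expand_cells row columns) := by unfold Pre_expand_cells; infer_instance

def pvWitness_expand_cells : List (List String) × (List (List (String × Int))) :=
  ([["a", "bb"], ["c"]], [[("width", 2)], [("width", 1)]])

def Spec_expand_cells (row : List (List String)) (columns : List (List (String × Int))) (out : List (List String)) : Prop := out = expand_cells_alt row columns
instance (row : List (List String)) (columns : List (List (String × Int))) (out : List (List String)) : Decidable (Spec_expand_cells row columns out) := by unfold Spec_expand_cells; infer_instance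

-- ===== CLAIM (what is proved, stated in full; the proofs are below) =====
def Claim_equal_expand_cells : Prop := ∀ (row : List (List String)) (columns : List (List (String × Int))), Dom_expand_cells row columns → Pre_expand_cells row columns → Spec_expand_cells row columns (expand_cells row columns)

-- ===== LEMMAS AND PROOFS =====

theorem min?_const {n : Nat} {l : List Nat} (hne : l ≠ []) (h : ∀ x ∈ l, x = n) :
    l.min? = some n := by
  induction l with
  | nil => exact absurd rfl hne
  | cons a t ih =>
    cases t with
    | nil => simp [List.min?, h a (by simp)]
    | cons b t' =>
      have := ih (by simp) (fun x hx => h x (List.mem_cons_of_mem _ hx))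
      simp [List.min?_cons, this, h a (by simp)]

theorem expand_cells_eq_alt (row : List (List String)) (columns : List (List (String × Int)))
    (hne : row ≠ []) : expand_cells row columns = expand_cells_alt row columns := by
  obtain ⟨m, hm⟩ : ∃ m, PySem.List.max? (row.map (·.length)) (fun x => x) = some m := by
    cases h : PySem.List.max? (row.map (·.length)) (fun x => x) with
    | none =>
      have := (PySem.List.max?_eq_none_iff _ _).mp h
      simp at this; exact absurd this hne
    | some m => exact ⟨m, rfl⟩
  have hle : ∀ cell ∈ row, cell.length ≤ m := by
    intro c hc
    simpa using PySem.List.max?_isMax hm c.length (List.mem_map_of_mem hc)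
  simp only [expand_cells, expand_cells_alt, pvZipStar, hm, Option.getD_some]
  have hmin : ((((PySem.List.enumerate row 0).map (fun p =>
      p.2 ++ List.replicate (m - p.2.length) (pvBlank columns p.1.toNat))).map (·.length)).min?)
      = some m := by
    apply min?_const
    · simp only [ne_eq, List.map_eq_nil_iff]
      intro h
      have hlen := PySem.List.length_enumerate (xs := row) (s := 0)
      rw [h] at hlen
      simp [eq_comm, List.length_eq_zero_iff] at hlen
      exact hne hlen
    · intro x hx
      simp only [List.mem_map] at hx
      obtain ⟨p, hp, rfl⟩ := hx
      obtain ⟨q, hq, rfl⟩ := hp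
      rw [PySem.List.mem_enumerate_iff] at hq
      obtain ⟨k, hk, rfl⟩ := hq
      have := hle _ (List.getElem_mem hk)
      simp [List.length_append]
      omega
  rw [hmin, Option.getD_some]
  apply List.map_congr_left
  intro h hh
  rw [List.mem_range] at hh
  rw [List.map_map]
  apply List.map_congr_left
  intro p hp
  rw [PySem.List.mem_enumerate_iff] at hp
  obtain ⟨k, hk, rfl⟩ := hp
  have hleK : row[k].length ≤ m := hle _ (List.getElem_mem hk)
  have htoNat : ((0 : Int) + (k : Int)).toNat = k := by omega
  simp only [Function.comp, htoNat]
  by_cases hcase : h < row[k].length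
  · rw [if_pos hcase, List.getD_append _ _ _ _ hcase]
  · rw [if_neg hcase]
    push Not at hcase
    rw [List.getD_append_right _ _ _ _ hcase]
    have h1 : h - row[k].length < m - row[k].length := by omega
    have h2 : ((List.range row.length).map (fun i => pvBlank columns i)).getD k "" = pvBlank columns k := by
      simp [List.getD_eq_getElem?_getD, hk]
    rw [h2]
    simp [List.getD_eq_getElem?_getD, h1]

-- ===== VERDICT (by name: the statement is the Claim_ definition above) =====
theorem expand_cells_spec : Claim_equal_expand_cells := by
  intro row columns _ hpre
  unfold Spec_expand_cells
  exact expand_cells_eq_alt row columns hpre.1
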